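-- pv_equiv track=rewrite | github.com/an0mium/aragora | aragora/documents/chunking/strategies.py | _get_heading_context
-- ===== SOURCE A (Python) =====
-- def _get_heading_context(
--
--     position: int,
--     headings: list[tuple[int, str, int]],
-- ) -> str:
--     """Get the heading context for a position in the text."""
--     context_parts = []
--     current_levels: dict[int, str] = {}
--
--     for pos, heading, level in headings:
--         if pos > position:
--             break
--
--         # Clear lower-level headings when a higher-level one appears
--         current_levels = {k: v for k, v in current_levels.items() if k < level}
--         current_levels[level] = heading
--
--     # Build hierarchical context
--     for level in sorted(current_levels.keys()):
--         context_parts.append(current_levels[level])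
--
--     return " > ".join(context_parts) if context_parts else ""
-- ===== SOURCE B (Python) =====
-- def _get_heading_context(
--     position: int,
--     headings: list[tuple[int, str, int]],
-- ) -> str:
--     """Get the heading context for a position in the text."""
--     stack = []  # (level, heading), levels strictly increasing
--     for pos, heading, level in headings:
--         if pos > position:
--             break
--         while stack and stack[-1][0] >= level:
--             stack.pop()
--         stack.append((level, heading))
--     return " > ".join(h for _, h in stack)
-- ===== Notes on version B (the rewrite author's own statement) =====
-- stated objective: simpler
-- what changed: Replaces the per-heading dict-comprehension rebuild keyed by level plus a final sort of the keys with a stack of (level, heading) pairs popped while the top level is >= the new level, so the result is joined directly in stack order with no dict and no sorting.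
import Mathlib
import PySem

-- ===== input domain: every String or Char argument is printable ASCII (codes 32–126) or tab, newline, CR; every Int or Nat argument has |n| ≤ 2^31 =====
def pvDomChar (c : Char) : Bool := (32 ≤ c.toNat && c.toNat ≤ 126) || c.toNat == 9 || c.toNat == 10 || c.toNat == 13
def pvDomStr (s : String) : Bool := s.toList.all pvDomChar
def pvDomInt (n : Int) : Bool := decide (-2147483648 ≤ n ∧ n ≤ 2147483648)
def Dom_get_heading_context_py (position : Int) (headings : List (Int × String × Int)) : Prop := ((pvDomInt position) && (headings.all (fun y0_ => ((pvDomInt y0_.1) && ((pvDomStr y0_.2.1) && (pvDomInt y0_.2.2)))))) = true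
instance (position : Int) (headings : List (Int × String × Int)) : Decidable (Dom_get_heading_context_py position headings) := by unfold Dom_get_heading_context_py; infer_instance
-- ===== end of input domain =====

-- B replaces A's per-heading dict-comprehension rebuild (keyed by level) plus final key sort
-- with a stack popped while its top level is ≥ the new level, joined directly (objective: simpler).

-- ===== PORT A =====
-- A's loop over headings; the dict comprehension `{k: v for k, v in d.items() if k < level}`
-- is ported as Dict.mk of the filtered items list (exact: the source dict's keys are unique,
-- so the filtered pairs are inserted in order with no overwrite).
def pvALoop (position : Int) : List (Int × String × Int) → PySem.Dict Int String → PySem.Dict Int String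
  | [], d => d
  | (pos, heading, level) :: rest, d =>
    if pos > position then d
    else pvALoop position rest ((PySem.Dict.mk (d.items.filter (fun kv => kv.1 < level))).insert level heading)

def get_heading_context_py (position : Int) (headings : List (Int × String × Int)) : String :=
  let d := pvALoop position headings PySem.Dict.empty
  -- `current_levels[level]` for level ∈ sorted(current_levels.keys()): key always present, so getD "" is exact
  let context_parts := (PySem.List.sorted d.keys (fun k => k) false).map (fun k => (d.get? k).getD "")
  if context_parts ≠ [] then PySem.Str.join " > " context_parts else ""

-- ===== PORT B =====
-- `while stack and stack[-1][0] >= level: stack.pop()`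
def pvPopGE (level : Int) (stack : List (Int × String)) : List (Int × String) :=
  match h : stack.getLast? with
  | some top => if top.1 ≥ level then pvPopGE level stack.dropLast else stack
  | none => stack
termination_by stack.length
decreasing_by
  have hne : stack ≠ [] := by intro e; subst e; simp at h
  have : 0 < stack.length := List.length_pos_iff.mpr hne
  simp [List.length_dropLast]; omega

def pvBLoop (position : Int) : List (Int × String × Int) → List (Int × String) → List (Int × String)
  | [], st => st
  | (pos, heading, level) :: rest, st =>
    if pos > position then st
    else pvBLoop position rest (pvPopGE level st ++ [(level, heading)])

def get_heading_context_py_alt (position : Int) (headings : List (Int × String × Int)) : String :=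
  PySem.Str.join " > " ((pvBLoop position headings []).map (fun p => p.2))

-- ===== PRECONDITION & SPEC =====
def Spec_get_heading_context_py (position : Int) (headings : List (Int × String × Int)) (out : String) : Prop := out = get_heading_context_py_alt position headings
instance (position : Int) (headings : List (Int × String × Int)) (out : String) : Decidable (Spec_get_heading_context_py position headings out) := by unfold Spec_get_heading_context_py; infer_instance

-- ===== CLAIM (what is proved, stated in full; the proofs are below) =====
def Claim_equal_get_heading_context_py : Prop := ∀ (position : Int) (headings : List (Int × String × Int)), Dom_get_heading_context_py position headings → Spec_get_heading_context_py position headings (get_heading_context_py position headings)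

-- ===== LEMMAS AND PROOFS =====

theorem pvPopGE_nil (level : Int) : pvPopGE level [] = [] := by
  rw [pvPopGE]; split <;> simp_all

theorem pvPopGE_concat (level : Int) (l : List (Int × String)) (p : Int × String) :
    pvPopGE level (l ++ [p]) = if p.1 ≥ level then pvPopGE level l else l ++ [p] := by
  rw [pvPopGE]
  split
  · rename_i top h
    rw [List.getLast?_concat] at h
    cases h
    simp
  · rename_i h
    rw [List.getLast?_concat] at h
    cases h

-- On a stack whose levels strictly increase, popping the ≥-level suffix is filtering by < level.
theorem filter_eq_pvPopGE (level : Int) (st : List (Int × String))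
    (h : st.Pairwise (fun a b => a.1 < b.1)) :
    st.filter (fun p => p.1 < level) = pvPopGE level st := by
  induction st using List.reverseRecOn with
  | nil => simp [pvPopGE_nil]
  | append_singleton l p ih =>
    rw [pvPopGE_concat]
    rcases List.pairwise_append.mp h with ⟨hl, -, hlt⟩
    by_cases hp : p.1 ≥ level
    · simp only [if_pos hp]
      rw [← ih hl]
      simp [List.filter_append]
      omega
    · simp only [if_neg hp]
      rw [not_le] at hp
      rw [List.filter_append]
      have h1 : l.filter (fun p => p.1 < level) = l := by
        apply List.filter_eq_self.mpr
        intro a ha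
        have := hlt a ha p (by simp)
        simp; omega
      simp [h1, hp]

-- Loop invariant: with equal, strictly-increasing states, A's dict items track B's stack.
theorem loop_inv (position : Int) (hs : List (Int × String × Int)) :
    ∀ st : List (Int × String), st.Pairwise (fun a b => a.1 < b.1) →
      (pvALoop position hs (PySem.Dict.mk st)).items = pvBLoop position hs st ∧
      (pvALoop position hs (PySem.Dict.mk st)).items.Pairwise (fun a b => a.1 < b.1) := by
  induction hs with
  | nil => intro st h; exact ⟨rfl, h⟩
  | cons hd rest ih =>
    intro st h
    obtain ⟨pos, heading, level⟩ := hd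
    by_cases hb : pos > position
    · refine ⟨?_, ?_⟩
      · show (pvALoop position ((pos, heading, level) :: rest) (PySem.Dict.mk st)).items
            = pvBLoop position ((pos, heading, level) :: rest) st
        simp only [pvALoop, pvBLoop, if_pos hb]
      · show (pvALoop position ((pos, heading, level) :: rest) (PySem.Dict.mk st)).items.Pairwise _
        simp only [pvALoop, if_pos hb]; exact h
    · have hfi : (PySem.Dict.mk st).items.filter (fun kv => kv.1 < level)
          = st.filter (fun kv => kv.1 < level) := rfl
      have hnc : (PySem.Dict.mk (st.filter (fun kv => kv.1 < level))).contains level = false := by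
        rw [PySem.Dict.contains_mk]
        simp only [List.any_eq_false]
        intro a ha
        have := List.of_mem_filter ha
        simp_all
        omega
      have hitems : ((PySem.Dict.mk (st.filter (fun kv => kv.1 < level))).insert level heading).items
          = pvPopGE level st ++ [(level, heading)] := by
        rw [PySem.Dict.items_insert_of_not_contains _ _ hnc]
        rw [show (PySem.Dict.mk (st.filter (fun kv => kv.1 < level))).items
            = st.filter (fun kv => kv.1 < level) from rfl]
        rw [filter_eq_pvPopGE level st h]
      have hincr : (pvPopGE level st ++ [(level, heading)]).Pairwise (fun a b => a.1 < b.1) := by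
        rw [← filter_eq_pvPopGE level st h]
        apply List.pairwise_append.mpr
        refine ⟨h.filter _, by simp, ?_⟩
        intro a ha b hb'
        have := List.of_mem_filter ha
        simp at hb'
        simp_all
      have step := ih (pvPopGE level st ++ [(level, heading)]) hincr
      constructor
      · show (pvALoop position ((pos, heading, level) :: rest) (PySem.Dict.mk st)).items
            = pvBLoop position ((pos, heading, level) :: rest) st
        rw [pvALoop, pvBLoop]
        simp only [if_neg hb]
        have hd' : ((PySem.Dict.mk st).items.filter (fun kv => kv.1 < level)) = st.filter (fun kv => kv.1 < level) := rfl
        rw [show (PySem.Dict.mk ((PySem.Dict.mk st).items.filter (fun kv => kv.1 < level))).insert level heading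
            = PySem.Dict.mk (pvPopGE level st ++ [(level, heading)]) from PySem.Dict.ext (by rw [← hitems]) ]
        exact step.1
      · show (pvALoop position ((pos, heading, level) :: rest) (PySem.Dict.mk st)).items.Pairwise _
        rw [pvALoop]
        simp only [if_neg hb]
        rw [show (PySem.Dict.mk ((PySem.Dict.mk st).items.filter (fun kv => kv.1 < level))).insert level heading
            = PySem.Dict.mk (pvPopGE level st ++ [(level, heading)]) from PySem.Dict.ext (by rw [← hitems]) ]
        exact step.2

-- ===== VERDICT (by name: the statement is the Claim_ definition above) =====
theorem get_heading_context_py_spec : Claim_equal_get_heading_context_py := by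
  unfold Claim_equal_get_heading_context_py
  intro position headings _
  unfold Spec_get_heading_context_py get_heading_context_py get_heading_context_py_alt
  have hmk : PySem.Dict.empty = (PySem.Dict.mk [] : PySem.Dict Int String) := rfl
  obtain ⟨hit, hinc⟩ := loop_inv position headings [] (by simp)
  rw [hmk]
  dsimp only
  set d := pvALoop position headings (PySem.Dict.mk []) with hd
  set st := pvBLoop position headings ([] : List (Int × String)) with hst
  -- keys are strictly increasing, hence sorted and Nodup
  have hkeys : d.keys.Pairwise (fun a b => a < b) := by
    have h2 : (d.items.map (fun p => p.1)).Pairwise (fun a b => a < b) :=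
      List.Pairwise.map _ (fun a b hab => hab) hinc
    simpa [PySem.Dict.keys] using h2
  have hsorted : PySem.List.sorted d.keys (fun k => k) false = d.keys :=
    PySem.List.sorted_eq_self_of_pairwise d.keys (fun k => k) (hkeys.imp (fun h => le_of_lt h))
  have hnd : d.keys.Nodup := hkeys.imp (fun h => ne_of_lt h)
  have hmap : d.keys.map (fun k => (d.get? k).getD "") = d.values := by
    rw [show d.keys.map (fun k => (d.get? k).getD "") = d.keys.map (fun k => d.getD k "") from by
      simp [PySem.Dict.getD_eq_get?_getD]]
    exact (PySem.Dict.values_eq_map_keys d hnd "").symm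
  rw [hsorted, hmap]
  have hvals : d.values = st.map (fun p => p.2) := by
    simp [PySem.Dict.values, hit]
  rw [hvals]
  by_cases hnil : st.map (fun p => p.2) = []
  · simp [hnil]
    decide
  · simp [hnil]
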